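-- pv_equiv track=rewrite | github.com/vgkits/vanguard-cli | vgkits/vanguard/__init__.py | calculateFlashLookup
-- ===== SOURCE A (Python) =====
-- boards = {
--     "nodemcu_m": {
--         "manufacturer": "51",
--         "device": "4014",
--         "flash_size": "1MB",
--         "flash_mode":"dout",
--     },
--     "esp01_1M": {
--         "manufacturer": "ef",
--         "device": "4014",
--         "flash_size": "1MB",
--         "flash_mode":"dio",
--     },
--     "nodemcu_v2_amica": {
--         "manufacturer": "ef",
--         "device": "4016",
--         "flash_size": "4MB",
--         "flash_mode": "qio", # Pretty sure NodeMCU v2 is qio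
--     },
--     "feather_huzzah": {
--         "chip": "ESP8266EX",
--         "manufacturer": "e0",
--         "device": "4016",
--         "flash_size": "4MB",
--         "flash_mode": "qio",
--     },
--     "d1_mini": {
--         "chip": "ESP8266EX",
--         "manufacturer": "20",
--         "device": "4016",
--         "flash_size": "4MB",
--         "flash_mode": "qio",
--     },
--     "d1_mini_variant": {
--         "chip": "ESP8266EX",
--         "manufacturer": "5e",
--         "device": "4016",
--         "flash_size": "4MB",
--         "flash_mode": "qio",
--     },
-- }
--
-- def calculateFlashLookup(deviceName=None, deviceConfig=None):
--     if deviceName: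
--         return boards[deviceName]
--     elif deviceConfig:
--         for name,lookup in boards.items():
--             if all([lookup[key]==deviceConfig[key] for key in ["manufacturer", "device", "flash_size"]]):
--                 return lookup
--         else:
--             return None
--     else:
--         raise RuntimeError("Requires deviceName or deviceConfig argument to be provided")
-- ===== SOURCE B (Python) =====
-- boards = {
--     "nodemcu_m": {
--         "manufacturer": "51",
--         "device": "4014",
--         "flash_size": "1MB",
--         "flash_mode": "dout",
--     },
--     "esp01_1M": {
--         "manufacturer": "ef",
--         "device": "4014",
--         "flash_size": "1MB",
--         "flash_mode": "dio",
--     },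
--     "nodemcu_v2_amica": {
--         "manufacturer": "ef",
--         "device": "4016",
--         "flash_size": "4MB",
--         "flash_mode": "qio",
--     },
--     "feather_huzzah": {
--         "chip": "ESP8266EX",
--         "manufacturer": "e0",
--         "device": "4016",
--         "flash_size": "4MB",
--         "flash_mode": "qio",
--     },
--     "d1_mini": {
--         "chip": "ESP8266EX",
--         "manufacturer": "20",
--         "device": "4016",
--         "flash_size": "4MB",
--         "flash_mode": "qio",
--     },
--     "d1_mini_variant": {
--         "chip": "ESP8266EX",
--         "manufacturer": "5e",
--         "device": "4016",
--         "flash_size": "4MB",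
--         "flash_mode": "qio",
--     },
-- }
--
-- # Index built once: (manufacturer, device, flash_size) -> board dict.
-- # All six triples are distinct, so the index is lossless.
-- _index = {
--     (b["manufacturer"], b["device"], b["flash_size"]): b for b in boards.values()
-- }
--
--
-- def calculateFlashLookup(deviceName=None, deviceConfig=None):
--     if deviceName:
--         return boards[deviceName]
--     if deviceConfig:
--         key = (deviceConfig["manufacturer"], deviceConfig["device"],
--                deviceConfig["flash_size"])
--         return _index.get(key)
--     raise RuntimeError("Requires deviceName or deviceConfig argument to be provided")
-- ===== Notes on version B (the rewrite author's own statement) =====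
-- stated objective: idiomatic
-- what changed: The per-board scan with a three-key all([...]) comparison is replaced by a precomputed dict index mapping the (manufacturer, device, flash_size) triple to its board, so the deviceConfig branch is a single key construction plus index.get().
import Mathlib
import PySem

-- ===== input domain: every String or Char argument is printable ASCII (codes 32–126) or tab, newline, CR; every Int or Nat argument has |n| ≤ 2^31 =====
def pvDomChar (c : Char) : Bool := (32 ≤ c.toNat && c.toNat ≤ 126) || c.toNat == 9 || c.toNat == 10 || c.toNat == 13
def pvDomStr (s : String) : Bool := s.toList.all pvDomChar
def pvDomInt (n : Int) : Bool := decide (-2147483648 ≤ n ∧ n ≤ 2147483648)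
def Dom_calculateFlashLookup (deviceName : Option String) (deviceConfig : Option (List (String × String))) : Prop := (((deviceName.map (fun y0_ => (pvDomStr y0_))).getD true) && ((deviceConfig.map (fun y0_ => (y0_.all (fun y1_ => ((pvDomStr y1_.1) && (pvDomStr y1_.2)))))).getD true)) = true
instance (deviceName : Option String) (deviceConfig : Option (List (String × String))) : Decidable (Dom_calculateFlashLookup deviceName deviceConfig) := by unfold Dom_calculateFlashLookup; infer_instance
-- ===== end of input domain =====

-- B replaces A's per-board field-comparison scan by a precomputed (manufacturer, device, flash_size) → board index (idiomatic).
-- The module-level `boards` table, shared by both Pythons, is `boardsTable` below.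

def boardsTable : List (String × List (String × String)) :=
  [("nodemcu_m", [("manufacturer","51"),("device","4014"),("flash_size","1MB"),("flash_mode","dout")]),
   ("esp01_1M", [("manufacturer","ef"),("device","4014"),("flash_size","1MB"),("flash_mode","dio")]),
   ("nodemcu_v2_amica", [("manufacturer","ef"),("device","4016"),("flash_size","4MB"),("flash_mode","qio")]),
   ("feather_huzzah", [("chip","ESP8266EX"),("manufacturer","e0"),("device","4016"),("flash_size","4MB"),("flash_mode","qio")]),
   ("d1_mini", [("chip","ESP8266EX"),("manufacturer","20"),("device","4016"),("flash_size","4MB"),("flash_mode","qio")]),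
   ("d1_mini_variant", [("chip","ESP8266EX"),("manufacturer","5e"),("device","4016"),("flash_size","4MB"),("flash_mode","qio")])]

-- ===== PORT A =====
-- A's for/else scan: first board whose three fields equal the config's (all([...]) over the three keys).
def pvAScan (dc : List (String × String)) :
    List (String × List (String × String)) → Option (List (String × String))
  | [] => none
  | (_, lkp) :: rest =>
      if (["manufacturer", "device", "flash_size"].map
            (fun k => lkp.lookup k == dc.lookup k)).all id
      then some lkp
      else pvAScan dc rest

-- else-branch of A (`elif deviceConfig: … else: raise`); the raise is excluded by Pre_ (port returns none there).
def pvAElse (deviceConfig : Option (List (String × String))) : Option (List (String × String)) :=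
  match deviceConfig with
  | some (p :: ps) => pvAScan (p :: ps) boardsTable
  | _ => none

def calculateFlashLookup (deviceName : Option String) (deviceConfig : Option (List (String × String))) : Option (List (String × String)) :=
  match deviceName with
  | some s => if s ≠ "" then boardsTable.lookup s else pvAElse deviceConfig
  | none => pvAElse deviceConfig

-- ===== PORT B =====
-- B's precomputed index: (manufacturer, device, flash_size) triple → board.
def pvIndex : List ((String × String × String) × List (String × String)) :=
  [(("51","4014","1MB"), [("manufacturer","51"),("device","4014"),("flash_size","1MB"),("flash_mode","dout")]),
   (("ef","4014","1MB"), [("manufacturer","ef"),("device","4014"),("flash_size","1MB"),("flash_mode","dio")]),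
   (("ef","4016","4MB"), [("manufacturer","ef"),("device","4016"),("flash_size","4MB"),("flash_mode","qio")]),
   (("e0","4016","4MB"), [("chip","ESP8266EX"),("manufacturer","e0"),("device","4016"),("flash_size","4MB"),("flash_mode","qio")]),
   (("20","4016","4MB"), [("chip","ESP8266EX"),("manufacturer","20"),("device","4016"),("flash_size","4MB"),("flash_mode","qio")]),
   (("5e","4016","4MB"), [("chip","ESP8266EX"),("manufacturer","5e"),("device","4016"),("flash_size","4MB"),("flash_mode","qio")])]

-- deviceConfig branch of B: build the key triple, then one index lookup (KeyError cases excluded by Pre_).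
def pvBCfg (deviceConfig : Option (List (String × String))) : Option (List (String × String)) :=
  match deviceConfig with
  | some (p :: ps) =>
      match (p :: ps).lookup "manufacturer", (p :: ps).lookup "device", (p :: ps).lookup "flash_size" with
      | some m, some d, some f => pvIndex.lookup (m, d, f)
      | _, _, _ => none
  | _ => none

def calculateFlashLookup_alt (deviceName : Option String) (deviceConfig : Option (List (String × String))) : Option (List (String × String)) :=
  match deviceName with
  | some s => if s ≠ "" then boardsTable.lookup s else pvBCfg deviceConfig
  | none => pvBCfg deviceConfig

-- ===== PRECONDITION & SPEC =====
-- Pre_ excludes exactly the inputs where A raises: an unknown truthy deviceName (KeyError),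
-- a falsy deviceName with a falsy deviceConfig (RuntimeError), and a config missing one of the
-- three looked-up keys (KeyError).
def pvCfgOk (deviceConfig : Option (List (String × String))) : Bool :=
  match deviceConfig with
  | some l => !l.isEmpty && (l.map Prod.fst).contains "manufacturer" && (l.map Prod.fst).contains "device" && (l.map Prod.fst).contains "flash_size"
  | none => false

def Pre_calculateFlashLookup (deviceName : Option String) (deviceConfig : Option (List (String × String))) : Prop :=
  (match deviceName with
  | some s => if s = "" then pvCfgOk deviceConfig else (boardsTable.map Prod.fst).contains s
  | none => pvCfgOk deviceConfig) = true

instance (deviceName : Option String) (deviceConfig : Option (List (String × String))) : Decidable (Pre_calculateFlashLookup deviceName deviceConfig) := by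
  unfold Pre_calculateFlashLookup; infer_instance

def pvWitness_calculateFlashLookup : Option String × (Option (List (String × String))) :=
  (none, some [("manufacturer","ef"),("device","4014"),("flash_size","1MB")])

def Spec_calculateFlashLookup (deviceName : Option String) (deviceConfig : Option (List (String × String))) (out : Option (List (String × String))) : Prop := out = calculateFlashLookup_alt deviceName deviceConfig
instance (deviceName : Option String) (deviceConfig : Option (List (String × String))) (out : Option (List (String × String))) : Decidable (Spec_calculateFlashLookup deviceName deviceConfig out) := by unfold Spec_calculateFlashLookup; infer_instance

-- ===== CLAIM (what is proved, stated in full; the proofs are below) =====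
def Claim_equal_calculateFlashLookup : Prop := ∀ (deviceName : Option String) (deviceConfig : Option (List (String × String))), Dom_calculateFlashLookup deviceName deviceConfig → Pre_calculateFlashLookup deviceName deviceConfig → Spec_calculateFlashLookup deviceName deviceConfig (calculateFlashLookup deviceName deviceConfig)

-- ===== LEMMAS AND PROOFS =====

-- A's scan over the fixed table equals B's index lookup, once the three config values exist.
theorem pvScan_eq_index (l : List (String × String)) (m d f : String)
    (hm : l.lookup "manufacturer" = some m) (hd : l.lookup "device" = some d)
    (hf : l.lookup "flash_size" = some f) :
    pvAScan l boardsTable = pvIndex.lookup (m, d, f) := by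
  have e : ∀ (a b c : String), ¬(m = a ∧ d = b ∧ f = c) → ((m, d, f) == (a, b, c)) = false := by
    intro a b c h
    simp only [beq_eq_false_iff_ne, ne_eq, Prod.mk.injEq, not_and]
    intro h1 h2 h3
    exact h ⟨h1, h2, h3⟩
  simp [pvAScan, boardsTable, pvIndex, List.lookup, hm, hd, hf, List.all]
  simp only [eq_comm]
  split_ifs with h1 h2 h3 h4 h5 h6
  · obtain ⟨rfl, rfl, rfl⟩ := h1; decide
  · obtain ⟨rfl, rfl, rfl⟩ := h2; decide
  · obtain ⟨rfl, rfl, rfl⟩ := h3; decide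
  · obtain ⟨rfl, rfl, rfl⟩ := h4; decide
  · obtain ⟨rfl, rfl, rfl⟩ := h5; decide
  · obtain ⟨rfl, rfl, rfl⟩ := h6; decide
  · rw [e _ _ _ h1, e _ _ _ h2, e _ _ _ h3, e _ _ _ h4, e _ _ _ h5, e _ _ _ h6]

-- membership of a key among the first components gives a successful lookup
theorem pvLookup_isSome (k : String) (l : List (String × String))
    (h : k ∈ l.map Prod.fst) : ∃ v, l.lookup k = some v := by
  induction l with
  | nil => exact absurd h (by simp)
  | cons p ps ih =>
    by_cases hk : k == p.1
    · exact ⟨p.2, by simp [List.lookup, hk]⟩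
    · simp only [List.map_cons, List.mem_cons] at h
      rcases h with h | h
      · exact absurd (by simp [h]) hk
      · obtain ⟨v, hv⟩ := ih h
        exact ⟨v, by simp [List.lookup, hk, hv]⟩

-- the two config branches agree whenever the config is non-empty and carries the three keys
theorem pvElse_eq_bCfg (dc : Option (List (String × String))) (h : pvCfgOk dc = true) :
    pvAElse dc = pvBCfg dc := by
  cases dc with
  | none => simp [pvCfgOk] at h
  | some l =>
    cases l with
    | nil => simp [pvCfgOk] at h
    | cons p ps =>
      simp only [pvCfgOk, Bool.and_eq_true, List.contains_eq_mem, decide_eq_true_eq] at h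
      obtain ⟨⟨⟨-, hm⟩, hd⟩, hf⟩ := h
      obtain ⟨m, hm⟩ := pvLookup_isSome _ _ hm
      obtain ⟨d, hd⟩ := pvLookup_isSome _ _ hd
      obtain ⟨f, hf⟩ := pvLookup_isSome _ _ hf
      rw [pvAElse, pvBCfg, hm, hd, hf]
      exact pvScan_eq_index (p :: ps) m d f hm hd hf

-- ===== VERDICT (by name: the statement is the Claim_ definition above) =====
theorem calculateFlashLookup_spec : Claim_equal_calculateFlashLookup := by
  intro dn dc _ hpre
  unfold Spec_calculateFlashLookup
  cases dn with
  | none =>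
    simp only [Pre_calculateFlashLookup] at hpre
    simpa [calculateFlashLookup, calculateFlashLookup_alt] using (pvElse_eq_bCfg dc hpre)
  | some s =>
    by_cases hs : s = ""
    · subst hs
      simp only [Pre_calculateFlashLookup] at hpre
      simpa [calculateFlashLookup, calculateFlashLookup_alt] using (pvElse_eq_bCfg dc hpre)
    · simp [calculateFlashLookup, calculateFlashLookup_alt, hs]
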